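-- pv_equiv track=rewrite | github.com/MousaAshraf/PumpingLemmaDemonstrator | PumpingLemmaDemonstrator.py | is_in_language
-- ===== SOURCE A (Python) =====
-- def is_in_language(language, s):
--     """Check if the pumped string belongs to the language with basic pattern matching."""
--     if not language.strip():
--         return True  # Accept all if no language specified
--     if language.lower() == "a^n b^n":
--         a_count = s.count('a')
--         b_count = s.count('b')
--         return a_count == b_count and all(c == 'a' for c in s[:a_count]) and all(c == 'b' for c in s[a_count:])
--     elif language.lower() == "a^n b^n c^n":
--         a_count = s.count('a')
--         b_count = s.count('b')
--         c_count = s.count('c')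
--         return (a_count == b_count == c_count and
--                 all(c == 'a' for c in s[:a_count]) and
--                 all(c == 'b' for c in s[a_count:a_count+b_count]) and
--                 all(c == 'c' for c in s[a_count+b_count:]))
--     elif language.lower() == "palindromes":
--         return s == s[::-1]
--     else:
--         return True
-- ===== SOURCE B (Python) =====
-- def is_in_language(language, s):
--     """Check if the pumped string belongs to the language with basic pattern matching."""
--     if not language.strip():
--         return True
--     lang = language.lower()
--     if lang == "a^n b^n":
--         n = len(s) // 2
--         return s == 'a' * n + 'b' * n
--     if lang == "a^n b^n c^n":
--         n = len(s) // 3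
--         return s == 'a' * n + 'b' * n + 'c' * n
--     if lang == "palindromes":
--         return s == s[::-1]
--     return True
-- ===== Notes on version B (the rewrite author's own statement) =====
-- stated objective: simpler
-- what changed: The two pattern branches no longer count characters and validate three slices with all(); they build the canonical string a^n b^n (resp. a^n b^n c^n) for n = len(s)//2 (resp. //3) and compare by a single equality.
import Mathlib
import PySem

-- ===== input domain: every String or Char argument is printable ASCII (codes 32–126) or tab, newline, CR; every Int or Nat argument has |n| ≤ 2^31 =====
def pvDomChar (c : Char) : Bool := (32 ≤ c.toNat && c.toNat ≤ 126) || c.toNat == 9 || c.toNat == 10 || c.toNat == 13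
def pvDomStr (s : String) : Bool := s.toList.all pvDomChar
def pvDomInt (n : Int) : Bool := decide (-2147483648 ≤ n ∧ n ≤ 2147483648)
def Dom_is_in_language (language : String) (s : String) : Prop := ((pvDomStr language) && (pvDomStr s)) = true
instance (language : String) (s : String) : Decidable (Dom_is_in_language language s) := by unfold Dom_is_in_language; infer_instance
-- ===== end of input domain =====

-- B replaces A's count-and-validate-three-slices pattern checks by building the canonical
-- string a^n b^n (resp. a^n b^n c^n) and comparing with one equality (objective: simpler).

-- ===== PORT A =====
def is_in_language (language : String) (s : String) : Bool :=
  if PySem.Str.strip language = "" then true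
  else if PySem.Str.lower language = "a^n b^n" then
    let a_count := PySem.Str.count s "a"
    let b_count := PySem.Str.count s "b"
    decide (a_count = b_count)
      && (PySem.Str.slice s none (some (a_count : Int))).toList.all (fun c => c == 'a')
      && (PySem.Str.slice s (some (a_count : Int)) none).toList.all (fun c => c == 'b')
  else if PySem.Str.lower language = "a^n b^n c^n" then
    let a_count := PySem.Str.count s "a"
    let b_count := PySem.Str.count s "b"
    let c_count := PySem.Str.count s "c"
    (decide (a_count = b_count) && decide (b_count = c_count))
      && (PySem.Str.slice s none (some (a_count : Int))).toList.all (fun c => c == 'a')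
      && (PySem.Str.slice s (some (a_count : Int)) (some ((a_count : Int) + (b_count : Int)))).toList.all (fun c => c == 'b')
      && (PySem.Str.slice s (some ((a_count : Int) + (b_count : Int))) none).toList.all (fun c => c == 'c')
  else if PySem.Str.lower language = "palindromes" then
    decide (some s = PySem.Str.slice? s none none (-1))
  else true

-- ===== PORT B =====
def is_in_language_alt (language : String) (s : String) : Bool :=
  if PySem.Str.strip language = "" then true
  else
    let lang := PySem.Str.lower language
    if lang = "a^n b^n" then
      let n := (PySem.Int.floordiv (PySem.Str.len s) 2).toNat
      decide (s = String.ofList (List.replicate n 'a' ++ List.replicate n 'b'))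
    else if lang = "a^n b^n c^n" then
      let n := (PySem.Int.floordiv (PySem.Str.len s) 3).toNat
      decide (s = String.ofList (List.replicate n 'a' ++ List.replicate n 'b' ++ List.replicate n 'c'))
    else if lang = "palindromes" then
      decide (some s = PySem.Str.slice? s none none (-1))
    else true

-- ===== PRECONDITION & SPEC =====
def Spec_is_in_language (language : String) (s : String) (out : Bool) : Prop := out = is_in_language_alt language s
instance (language : String) (s : String) (out : Bool) : Decidable (Spec_is_in_language language s out) := by unfold Spec_is_in_language; infer_instance

-- ===== CLAIM (what is proved, stated in full; the proofs are below) =====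
def Claim_equal_is_in_language : Prop := ∀ (language : String) (s : String), Dom_is_in_language language s → Spec_is_in_language language s (is_in_language language s)

-- ===== LEMMAS AND PROOFS =====

-- Python s.count(c) for a single character is List.count on s's characters.
theorem pv_count_go_single (c : Char) : ∀ (fuel : Nat) (l : List Char) (acc : Nat), l.length ≤ fuel →
    PySem.Chars.count.go [c] fuel l acc = acc + l.count c := by
  intro fuel
  induction fuel with
  | zero => intro l acc h; cases l with
    | nil => simp [PySem.Chars.count.go]
    | cons h t => simp at h
  | succ n ih =>
    intro l acc h
    cases l with
    | nil => simp [PySem.Chars.count.go]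
    | cons x t =>
      simp only [PySem.Chars.count.go]
      by_cases hx : c = x
      · subst hx
        simp [List.isPrefixOf, ih t (acc + 1) (by simpa using h)]
        omega
      · simp [List.isPrefixOf, hx, ih t acc (by simpa using h), Ne.symm hx]

theorem pv_count_single (l : List Char) (c : Char) : PySem.Chars.count l [c] = l.count c := by
  simp [PySem.Chars.count, pv_count_go_single c l.length l 0 le_rfl]

theorem pv_all_rep {l : List Char} {c : Char} (h : l.all (fun x => x == c) = true) :
    l = List.replicate l.length c := by
  rw [List.eq_replicate_length]
  intro b hb
  simpa using (List.all_eq_true.mp h) b hb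

-- A's count/slice test for a^n b^n characterises exactly the canonical string.
theorem pv_two_iff (l : List Char) :
    (l.count 'a' = l.count 'b' ∧ (l.take (l.count 'a')).all (fun x => x == 'a') = true
       ∧ (l.drop (l.count 'a')).all (fun x => x == 'b') = true)
    ↔ l = List.replicate (l.length / 2) 'a' ++ List.replicate (l.length / 2) 'b' := by
  constructor
  · rintro ⟨hab, ht, hd⟩
    set a := l.count 'a' with ha
    have h1 := pv_all_rep ht
    have h2 := pv_all_rep hd
    have hl : l = l.take a ++ l.drop a := (List.take_append_drop a l).symm
    have hca : a = (l.take a).length := by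
      conv_lhs => rw [ha, hl]
      rw [List.count_append, h1, h2, List.count_replicate, List.count_replicate]
      simp
    have htl : (l.take a).length = min a l.length := by simp
    have hcb : l.count 'b' = l.length - a := by
      conv_lhs => rw [hl]
      rw [List.count_append, h1, h2, List.count_replicate, List.count_replicate]
      simp
    have hale : a ≤ l.length := by omega
    have hlen : l.length = 2 * a := by omega
    have hn : l.length / 2 = a := by omega
    rw [hn, hl]
    congr 1
    · rw [h1]; congr 1; omega
    · rw [h2]; congr 1; simp; omega
  · intro h
    obtain ⟨n, hn⟩ : ∃ n, l = List.replicate n 'a' ++ List.replicate n 'b' := ⟨_, h⟩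
    have hlen : l.length = n + n := by rw [hn]; simp
    have hla : l.count 'a' = n := by rw [hn]; simp [List.count_append, List.count_replicate]
    refine ⟨?_, ?_, ?_⟩
    · rw [hla, hn]; simp [List.count_append, List.count_replicate]
    · rw [hla, hn, List.take_append_of_le_length (by simp)]
      simp
    · rw [hla, hn, List.drop_append_of_le_length (by simp)]
      simp

-- A's count/slice test for a^n b^n c^n characterises exactly the canonical string.
theorem pv_three_iff (l : List Char) :
    (l.count 'a' = l.count 'b' ∧ l.count 'b' = l.count 'c' ∧
     (l.take (l.count 'a')).all (fun x => x == 'a') = true ∧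
     ((l.drop (l.count 'a')).take (l.count 'b')).all (fun x => x == 'b') = true ∧
     (l.drop (l.count 'a' + l.count 'b')).all (fun x => x == 'c') = true)
    ↔ l = List.replicate (l.length / 3) 'a' ++ List.replicate (l.length / 3) 'b'
          ++ List.replicate (l.length / 3) 'c' := by
  constructor
  · rintro ⟨hab, hbc, h1, h2, h3⟩
    set a := l.count 'a' with ha
    set b := l.count 'b' with hb
    have e1 := pv_all_rep h1
    have e2 := pv_all_rep h2
    have e3 := pv_all_rep h3
    have hdd : (l.drop a).drop b = l.drop (a + b) := by rw [List.drop_drop]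
    have hl : l = l.take a ++ ((l.drop a).take b ++ l.drop (a + b)) := by
      rw [← hdd, List.take_append_drop, List.take_append_drop]
    have hca : a = (l.take a).length := by
      conv_lhs => rw [ha, hl]
      rw [List.count_append, List.count_append, e1, e2, e3]
      simp [List.count_replicate]
    have hcb : b = ((l.drop a).take b).length := by
      conv_lhs => rw [hb, hl]
      rw [List.count_append, List.count_append, e1, e2, e3]
      simp [List.count_replicate]
    have hcc : l.count 'c' = (l.drop (a + b)).length := by
      conv_lhs => rw [hl]
      rw [List.count_append, List.count_append, e1, e2, e3]
      simp [List.count_replicate]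
    have l1 : (l.take a).length = min a l.length := by simp
    have l2 : ((l.drop a).take b).length = min b (l.length - a) := by simp
    have l3 : (l.drop (a + b)).length = l.length - (a + b) := by simp
    have hale : a ≤ l.length := by omega
    have hble : b ≤ l.length - a := by omega
    have hlen : l.length = 3 * a := by omega
    have hn : l.length / 3 = a := by omega
    rw [hn, ← List.append_assoc] at *
    rw [hl]
    rw [e1, e2, e3]
    congr 1
    congr 1
    · congr 1; omega
    · congr 1; omega
    · congr 1; omega
  · intro h
    obtain ⟨n, hn⟩ : ∃ n, l = List.replicate n 'a' ++ List.replicate n 'b' ++ List.replicate n 'c' := ⟨_, h⟩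
    have hlen : l.length = n + n + n := by rw [hn]; simp; try omega
    have hla : l.count 'a' = n := by rw [hn]; simp [List.count_append, List.count_replicate]
    have hlb : l.count 'b' = n := by rw [hn]; simp [List.count_append, List.count_replicate]
    refine ⟨?_, ?_, ?_, ?_, ?_⟩
    · rw [hla, hlb]
    · rw [hlb, hn]; simp [List.count_append, List.count_replicate]
    · rw [hla, hn, List.append_assoc, List.take_append_of_le_length (by simp)]
      simp
    · rw [hla, hlb, hn, List.append_assoc, List.drop_append_of_le_length (by simp)]
      simp
    · rw [hla, hlb, hn, List.drop_append_of_le_length (by simp)]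
      have hle : (List.replicate n 'a' ++ List.replicate n 'b' : List Char).length ≤ n + n := by simp
      simp [List.drop_eq_nil_of_le hle]

-- ===== VERDICT (by name: the statement is the Claim_ definition above) =====
theorem is_in_language_spec : Claim_equal_is_in_language := by
  intro language s _
  unfold Spec_is_in_language is_in_language is_in_language_alt
  by_cases h0 : PySem.Str.strip language = ""
  · simp [h0]
  · simp only [h0, if_false]
    by_cases h2 : PySem.Str.lower language = "a^n b^n"
    · simp only [h2, if_pos]
      have hc : ∀ c : Char, PySem.Str.count s (String.ofList [c]) = s.toList.count c := by
        intro c; rw [PySem.Str.count_eq]; simpa using pv_count_single s.toList c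
      have hca : PySem.Str.count s "a" = s.toList.count 'a' := hc 'a'
      have hcb : PySem.Str.count s "b" = s.toList.count 'b' := hc 'b'
      have hlen : (PySem.Int.floordiv (PySem.Str.len s) 2).toNat = s.toList.length / 2 := by
        simp [pysem]
        omega
      rw [Bool.eq_iff_iff]
      simp only [Bool.and_eq_true, decide_eq_true_iff, hca, hcb, hlen,
        PySem.Str.toList_slice]
      rw [String.ext_iff, String.toList_ofList]
      have hsl1 : PySem.Chars.slice s.toList none (some ((s.toList.count 'a' : Nat) : Int))
          = s.toList.take (s.toList.count 'a') := by simp [pysem]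
      have hsl2 : PySem.Chars.slice s.toList (some ((s.toList.count 'a' : Nat) : Int)) none
          = s.toList.drop (s.toList.count 'a') := by simp [pysem]
      rw [hsl1, hsl2]
      rw [and_assoc]
      exact pv_two_iff s.toList
    · simp only [h2, if_false]
      by_cases h3 : PySem.Str.lower language = "a^n b^n c^n"
      · simp only [h3, if_pos]
        have hc : ∀ c : Char, PySem.Str.count s (String.ofList [c]) = s.toList.count c := by
          intro c; rw [PySem.Str.count_eq]; simpa using pv_count_single s.toList c
        have hca : PySem.Str.count s "a" = s.toList.count 'a' := hc 'a'
        have hcb : PySem.Str.count s "b" = s.toList.count 'b' := hc 'b'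
        have hcc : PySem.Str.count s "c" = s.toList.count 'c' := hc 'c'
        have hlen : (PySem.Int.floordiv (PySem.Str.len s) 3).toNat = s.toList.length / 3 := by
          simp [pysem]
          omega
        rw [Bool.eq_iff_iff]
        simp only [Bool.and_eq_true, decide_eq_true_iff, hca, hcb, hcc, hlen,
          PySem.Str.toList_slice]
        rw [String.ext_iff, String.toList_ofList]
        have hsl1 : PySem.Chars.slice s.toList none (some ((s.toList.count 'a' : Nat) : Int))
            = s.toList.take (s.toList.count 'a') := by simp [pysem]
        have hsl2 : PySem.Chars.slice s.toList (some ((s.toList.count 'a' : Nat) : Int))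
            (some (((s.toList.count 'a' : Nat) : Int) + ((s.toList.count 'b' : Nat) : Int)))
            = (s.toList.drop (s.toList.count 'a')).take (s.toList.count 'b') := by
          simp [pysem, PySem.List.slice_natCast_add]
        have hsl3 : PySem.Chars.slice s.toList (some (((s.toList.count 'a' : Nat) : Int) + ((s.toList.count 'b' : Nat) : Int))) none
            = s.toList.drop (s.toList.count 'a' + s.toList.count 'b') := by
          rw [PySem.Chars.slice_eq_listSlice,
              PySem.List.slice_from s.toList
                (show (0:Int) ≤ ((s.toList.count 'a' : Nat) : Int) + ((s.toList.count 'b' : Nat) : Int) by positivity)]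
          congr 1
        rw [hsl1, hsl3]
        constructor
        · rintro ⟨⟨⟨⟨hab, hbc⟩, t1⟩, t2⟩, t3⟩
          refine (pv_three_iff s.toList).mp ⟨hab, hbc, t1, ?_, t3⟩
          rw [← hsl2]; exact t2
        · intro h
          obtain ⟨hab, hbc, t1, t2, t3⟩ := (pv_three_iff s.toList).mpr h
          refine ⟨⟨⟨⟨hab, hbc⟩, t1⟩, ?_⟩, t3⟩
          rw [hsl2]; exact t2
      · simp only [h3, if_false]
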